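-- pv_equiv track=rewrite | github.com/divinenaman/basic-coding-lib | Array/perfect_peak_of_array.py | perfectPeak
-- ===== SOURCE A (Python) =====
-- def perfectPeak(A):
--
--     max_prefix = [0] * len(A)
--     min_suffix = [0] * len(A)
--
--     max_prefix[0] = A[0]
--     min_suffix[len(A)-1] = A[len(A)-1]
--
--     for i in range(1, len(A) - 1):
--         max_prefix[i] = max(max_prefix[i-1], A[i-1])
--
--     for i in range(len(A) - 2, 0, -1):
--         min_suffix[i] = min(min_suffix[i+1], A[i+1])
--
--     found = None
--     for i in range(1, len(A) - 1):
--         if max_prefix[i] < A[i] and A[i] < min_suffix[i]: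
--             found = A[i]
--
--     if found == None:
--         return 0
--     else:
--         return 1
-- ===== SOURCE B (Python) =====
-- def perfectPeak(A):
--     n = len(A)
--     runmax = A[0]
--     cand = None
--     for i in range(1, n):
--         x = A[i]
--         if cand is not None and x <= cand:
--             cand = None
--         if cand is None and i < n - 1 and x > runmax:
--             cand = x
--         if x > runmax:
--             runmax = x
--     return 0 if cand is None else 1
-- ===== Notes on version B (the rewrite author's own statement) =====
-- stated objective: faster
-- what changed: A builds prefix-max and suffix-min arrays in three index loops and scans for the last match; B makes a single forward pass with O(1) extra state, maintaining a running maximum and one surviving candidate peak that is invalidated whenever a later element is not strictly larger.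
import Mathlib
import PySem

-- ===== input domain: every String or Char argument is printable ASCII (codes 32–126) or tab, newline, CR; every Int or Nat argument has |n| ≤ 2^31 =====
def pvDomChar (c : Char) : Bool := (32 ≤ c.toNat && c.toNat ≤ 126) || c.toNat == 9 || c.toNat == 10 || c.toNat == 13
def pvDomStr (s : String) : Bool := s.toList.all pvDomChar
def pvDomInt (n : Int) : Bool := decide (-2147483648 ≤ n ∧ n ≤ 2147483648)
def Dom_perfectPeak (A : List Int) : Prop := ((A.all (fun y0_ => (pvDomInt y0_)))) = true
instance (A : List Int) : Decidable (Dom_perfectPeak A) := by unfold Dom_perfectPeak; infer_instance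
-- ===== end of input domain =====

-- B replaces A's prefix-max/suffix-min arrays (three index loops) by a single forward
-- pass with O(1) extra state: a running maximum plus one surviving candidate peak,
-- invalidated whenever a later element is not strictly larger (alternative algorithm).

-- ===== PORT A =====
-- A-side helpers: one named fold per Python loop (indices are nonnegative and in
-- range on Pre_, so A[i] is ported exactly as A.getD i 0)
-- for i in range(1, len(A)-1): max_prefix[i] = max(max_prefix[i-1], A[i-1])
def mpArr (A : List Int) (k : Nat) : List Int :=
  (List.range' 1 k).foldl
    (fun mp i => mp.set i (max (mp.getD (i - 1) 0) (A.getD (i - 1) 0)))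
    ((List.replicate A.length (0 : Int)).set 0 (A.getD 0 0))

-- for i in range(len(A)-2, 0, -1): min_suffix[i] = min(min_suffix[i+1], A[i+1])
def msArrA (A : List Int) (init : List Int) (k : Nat) : List Int :=
  (List.range' 1 k).reverse.foldl
    (fun ms i => ms.set i (min (ms.getD (i + 1) 0) (A.getD (i + 1) 0))) init

-- for i in range(1, len(A)-1): if …: found = A[i]
def foundScan (A mp ms : List Int) (k : Nat) : Option Int :=
  (List.range' 1 k).foldl
    (fun found i =>
      if mp.getD i 0 < A.getD i 0 ∧ A.getD i 0 < ms.getD i 0 then some (A.getD i 0)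
      else found) none

def perfectPeak (A : List Int) : Int :=
  let n := A.length
  let mp := mpArr A (n - 2)
  let ms := msArrA A ((List.replicate n (0 : Int)).set (n - 1) (A.getD (n - 1) 0)) (n - 2)
  let found := foundScan A mp ms (n - 2)
  if found = none then 0 else 1

-- ===== PORT B =====
-- B-side helper: the body of Source B's single for-loop, branch for branch
def bStep (A : List Int) (n : Nat) (st : Option Int × Int) (i : Nat) : Option Int × Int :=
  let x := A.getD i 0
  -- if cand is not None and x <= cand: cand = None
  let cand1 : Option Int := match st.1 with
    | some c => if x ≤ c then none else some c
    | none => none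
  -- if cand is None and i < n - 1 and x > runmax: cand = x
  let cand2 : Option Int := if cand1 = none ∧ i < n - 1 ∧ st.2 < x then some x else cand1
  -- if x > runmax: runmax = x
  let runmax := if st.2 < x then x else st.2
  (cand2, runmax)

def perfectPeak_alt (A : List Int) : Int :=
  let n := A.length
  let st := (List.range' 1 (n - 1)).foldl (bStep A n) (none, A.getD 0 0)
  if st.1 = none then 0 else 1

-- ===== PRECONDITION & SPEC =====
-- Pre_ excludes only the empty list, on which both Pythons raise IndexError (A[0])
def Pre_perfectPeak (A : List Int) : Prop := A ≠ []
instance (A : List Int) : Decidable (Pre_perfectPeak A) := by unfold Pre_perfectPeak; infer_instance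
def pvWitness_perfectPeak : List Int := ([1, 3, 2] : List Int)

def Spec_perfectPeak (A : List Int) (out : Int) : Prop := out = perfectPeak_alt A
instance (A : List Int) (out : Int) : Decidable (Spec_perfectPeak A out) := by unfold Spec_perfectPeak; infer_instance

-- ===== CLAIM (what is proved, stated in full; the proofs are below) =====
def Claim_equal_perfectPeak : Prop := ∀ (A : List Int), Dom_perfectPeak A → Pre_perfectPeak A → Spec_perfectPeak A (perfectPeak A)

-- ===== LEMMAS AND PROOFS =====

-- reference prefix maximum: mpRef A i = max of A[0..i-1] for i ≥ 1 (mpRef A 0 = A[0])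
def mpRef (A : List Int) : Nat → Int
  | 0 => A.getD 0 0
  | i + 1 => max (mpRef A i) (A.getD i 0)

-- reference suffix minimum: msRef A i = min of A[i..n-1]
def msRef (A : List Int) (i : Nat) : Int :=
  match A.drop i with
  | [] => 0
  | x :: rest => rest.foldl min x

-- the common characterisation: a perfect peak exists
def FoundPeak (A : List Int) : Prop :=
  ∃ i : Nat, 1 ≤ i ∧ i + 1 < A.length ∧
    mpRef A i < A.getD i 0 ∧ A.getD i 0 < msRef A (i + 1)

theorem getD_set (l : List Int) (i j : Nat) (v : Int) :
    (l.set i v).getD j 0 = if i = j ∧ i < l.length then v else l.getD j 0 := by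
  simp only [List.getD, List.getElem?_set]
  split_ifs <;> simp_all
  omega

theorem drop_cons_getD (A : List Int) (i : Nat) (h : i < A.length) :
    A.drop i = A.getD i 0 :: A.drop (i + 1) := by
  rw [List.drop_eq_getElem_cons h]
  simp [List.getD, List.getElem?_eq_getElem h]

theorem foldl_min_init (l : List Int) (a b : Int) :
    l.foldl min (min a b) = min a (l.foldl min b) := by
  induction l generalizing b with
  | nil => simp
  | cons x xs ih => simp only [List.foldl_cons, min_assoc]; exact ih _

theorem msRef_rec (A : List Int) (j : Nat) (h : j + 1 < A.length) :
    msRef A j = min (A.getD j 0) (msRef A (j + 1)) := by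
  unfold msRef
  rw [drop_cons_getD A j (by omega), drop_cons_getD A (j + 1) h]
  simp only [List.foldl_cons]
  exact foldl_min_init _ _ _

theorem msRef_last (A : List Int) (hA : A ≠ []) :
    msRef A (A.length - 1) = A.getD (A.length - 1) 0 := by
  have hn : 1 ≤ A.length := List.length_pos_of_ne_nil hA
  unfold msRef
  rw [drop_cons_getD A (A.length - 1) (by omega),
    show A.length - 1 + 1 = A.length from by omega, List.drop_length]
  simp

-- each earlier element is ≤ mpRef A i
theorem le_mpRef (A : List Int) : ∀ i j : Nat, j < i → A.getD j 0 ≤ mpRef A i := by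
  intro i
  induction i with
  | zero => omega
  | succ i ih =>
    intro j hj
    by_cases hji : j = i
    · subst hji; exact le_max_right _ _
    · exact le_trans (ih j (by omega)) (le_max_left _ _)

-- suffix-min characterisation: c < min of A[i..n-1] iff c < every A[k], i ≤ k < n
theorem msRef_lt_iff (A : List Int) (hA : A ≠ []) (c : Int) :
    ∀ (d i : Nat), A.length - 1 - i = d → i < A.length →
    (c < msRef A i ↔ ∀ k : Nat, i ≤ k → k < A.length → c < A.getD k 0) := by
  intro d
  induction d with
  | zero =>
    intro i hd hi
    have hie : i = A.length - 1 := by omega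
    subst hie
    rw [msRef_last A hA]
    constructor
    · intro h k hk1 hk2
      have : k = A.length - 1 := by omega
      simpa [this] using h
    · intro h; exact h _ le_rfl (by omega)
  | succ d ih =>
    intro i hd hi
    rw [msRef_rec A i (by omega), lt_min_iff, ih (i + 1) (by omega) (by omega)]
    constructor
    · rintro ⟨h1, h2⟩ k hk1 hk2
      rcases Nat.eq_or_lt_of_le hk1 with h | h
      · simpa [← h] using h1
      · exact h2 k h hk2
    · intro h
      exact ⟨h i le_rfl hi, fun k hk1 hk2 => h k (by omega) hk2⟩

-- ---- side A ----

theorem mpArr_succ (A : List Int) (k : Nat) :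
    mpArr A (k + 1) = (mpArr A k).set (k + 1) (max ((mpArr A k).getD k 0) (A.getD k 0)) := by
  unfold mpArr
  rw [show List.range' 1 (k + 1) = List.range' 1 k ++ [1 + k] from by
    simpa using List.range'_concat (s := 1) (n := k) (step := 1), List.foldl_append]
  simp only [List.foldl_cons, List.foldl_nil]
  rw [show 1 + k = k + 1 from by omega]
  rfl

theorem mpArr_length (A : List Int) (k : Nat) : (mpArr A k).length = A.length := by
  induction k with
  | zero => simp [mpArr]
  | succ k ih => rw [mpArr_succ, List.length_set]; exact ih

theorem mpArr_getD (A : List Int) (hA : A ≠ []) (k : Nat) (hk : k ≤ A.length - 2) :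
    ∀ j : Nat, j ≤ k → (mpArr A k).getD j 0 = mpRef A j := by
  have hn : 1 ≤ A.length := List.length_pos_of_ne_nil hA
  induction k with
  | zero =>
    intro j hj
    interval_cases j
    unfold mpArr
    rw [List.range'_zero, List.foldl_nil, getD_set,
      if_pos ⟨rfl, by simp; omega⟩]
    rfl
  | succ k ih =>
    intro j hj
    rw [mpArr_succ, getD_set]
    by_cases hje : k + 1 = j
    · rw [if_pos ⟨hje, by rw [mpArr_length]; omega⟩, ih (by omega) k le_rfl, ← hje]
      rfl
    · rw [if_neg (by tauto)]
      exact ih (by omega) j (by omega)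

theorem msArrA_succ (A init : List Int) (k : Nat) :
    msArrA A init (k + 1) =
      msArrA A (init.set (k + 1) (min (init.getD (k + 2) 0) (A.getD (k + 2) 0))) k := by
  unfold msArrA
  rw [show List.range' 1 (k + 1) = List.range' 1 k ++ [1 + k] from by
    simpa using List.range'_concat (s := 1) (n := k) (step := 1)]
  rw [List.reverse_append]
  simp only [List.reverse_cons, List.reverse_nil, List.nil_append, List.cons_append,
    List.foldl_cons]
  rw [show 1 + k = k + 1 from by omega]

theorem msArrA_spec (A : List Int) (hA : A ≠ []) (k : Nat) (hk : k ≤ A.length - 2) :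
    ∀ init : List Int, init.length = A.length →
    (∀ j : Nat, k + 1 ≤ j → j + 1 ≤ A.length - 1 → init.getD j 0 = msRef A (j + 1)) →
    init.getD (A.length - 1) 0 = A.getD (A.length - 1) 0 →
    (∀ j : Nat, 1 ≤ j → j + 1 ≤ A.length - 1 → (msArrA A init k).getD j 0 = msRef A (j + 1)) := by
  have hn : 1 ≤ A.length := List.length_pos_of_ne_nil hA
  induction k with
  | zero =>
    intro init hlen hinit hlast j hj hj2
    unfold msArrA
    rw [List.range'_zero, List.reverse_nil, List.foldl_nil]
    exact hinit j (by omega) hj2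
  | succ k ih =>
    intro init hlen hinit hlast j hj hj2
    rw [msArrA_succ]
    have hvv : min (init.getD (k + 2) 0) (A.getD (k + 2) 0) = msRef A (k + 2) := by
      by_cases hend : k + 1 = A.length - 2
      · have hidx : k + 2 = A.length - 1 := by omega
        rw [hidx, hlast, min_self, msRef_last A hA]
      · rw [hinit (k + 2) (by omega) (by omega), msRef_rec A (k + 2) (by omega), min_comm]
    refine ih (by omega) _ (by simp [hlen]) ?_ ?_ j hj hj2
    · intro j' hj' hj2'
      rw [getD_set]
      by_cases hje : k + 1 = j'
      · rw [if_pos ⟨hje, by rw [hlen]; omega⟩, hvv, ← hje]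
      · rw [if_neg (by tauto)]
        exact hinit j' (by omega) hj2'
    · rw [getD_set, if_neg (by rintro ⟨h1, -⟩; omega)]
      exact hlast

theorem foldl_found_none (p : Nat → Prop) [DecidablePred p] (v : Nat → Int)
    (l : List Nat) (acc : Option Int) :
    (l.foldl (fun found i => if p i then some (v i) else found) acc = none)
      ↔ (acc = none ∧ ∀ i ∈ l, ¬ p i) := by
  induction l generalizing acc with
  | nil => simp
  | cons x xs ih =>
    simp only [List.foldl_cons, ih]
    by_cases hx : p x
    · simp [hx]
    · simp [hx]

theorem perfectPeak_one_iff (A : List Int) (hA : A ≠ []) :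
    perfectPeak A = 1 ↔ FoundPeak A := by
  have hn : 1 ≤ A.length := List.length_pos_of_ne_nil hA
  have hmp := mpArr_getD A hA (A.length - 2) le_rfl
  have hms := msArrA_spec A hA (A.length - 2) le_rfl
    ((List.replicate A.length (0 : Int)).set (A.length - 1) (A.getD (A.length - 1) 0))
    (by simp)
    (fun j hj hj2 => by omega)
    (by rw [getD_set, if_pos ⟨rfl, by simp; omega⟩])
  unfold perfectPeak
  simp only []
  unfold foundScan
  by_cases hf : FoundPeak A
  · obtain ⟨i, hi1, hi2, hc1, hc2⟩ := hf
    rw [if_neg, ]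
    · simp only [true_iff]
      exact ⟨i, hi1, hi2, hc1, hc2⟩
    · rw [foldl_found_none]
      rintro ⟨-, hall⟩
      refine hall i (List.mem_range'_1.mpr ⟨hi1, by omega⟩) ?_
      rw [hmp i (by omega), hms i hi1 (by omega)]
      exact ⟨hc1, hc2⟩
  · rw [if_pos]
    · constructor
      · intro h; exact absurd h (by norm_num)
      · intro h; exact absurd h hf
    · rw [foldl_found_none]
      refine ⟨rfl, ?_⟩
      rintro i hi ⟨hc1, hc2⟩
      rw [List.mem_range'_1] at hi
      have hi1 : 1 ≤ i := hi.1
      have hi2 : i + 1 < A.length := by omega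
      rw [hmp i (by omega), hms i hi1 (by omega)] at *
      exact hf ⟨i, hi1, hi2, hc1, hc2⟩

theorem perfectPeak_zero_or_one (A : List Int) :
    perfectPeak A = 0 ∨ perfectPeak A = 1 := by
  unfold perfectPeak
  simp only []
  split_ifs <;> simp

-- ---- side B ----

-- j is a still-alive candidate just before index i is processed
def Alive (A : List Int) (i j : Nat) : Prop :=
  1 ≤ j ∧ j < i ∧ j + 1 < A.length ∧ mpRef A j < A.getD j 0 ∧
    ∀ k : Nat, j < k → k < i → A.getD j 0 < A.getD k 0

-- loop invariant of Source B's single pass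
def LoopInv (A : List Int) (i : Nat) (st : Option Int × Int) : Prop :=
  st.2 = mpRef A i ∧
    ((st.1 = none ∧ ∀ j, ¬ Alive A i j) ∨
      ∃ j, Alive A i j ∧ st.1 = some (A.getD j 0) ∧
        ∀ j', Alive A i j' → A.getD j 0 ≤ A.getD j' 0)

theorem bStep_inv (A : List Int) (st : Option Int × Int) (i : Nat)
    (hinv : LoopInv A i st) (hi1 : 1 ≤ i) (hi2 : i < A.length) :
    LoopInv A (i + 1) (bStep A A.length st i) := by
  obtain ⟨hrun, hcand⟩ := hinv
  have hrun' : (bStep A A.length st i).2 = mpRef A (i + 1) := by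
    show (if st.2 < A.getD i 0 then A.getD i 0 else st.2) = max (mpRef A i) (A.getD i 0)
    rw [hrun]
    split_ifs with h <;> omega
  refine ⟨hrun', ?_⟩
  have hAlive_succ : ∀ j, Alive A (i + 1) j → j = i ∨ (Alive A i j ∧ A.getD j 0 < A.getD i 0) := by
    rintro j ⟨h1, h2, h3, h4, h5⟩
    by_cases hji : j = i
    · exact Or.inl hji
    · exact Or.inr ⟨⟨h1, by omega, h3, h4, fun k hk1 hk2 => h5 k hk1 (by omega)⟩,
        h5 i (by omega) (by omega)⟩
  have hAlive_keep : ∀ j, Alive A i j → A.getD j 0 < A.getD i 0 → Alive A (i + 1) j := by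
    rintro j ⟨h1, h2, h3, h4, h5⟩ hx
    refine ⟨h1, by omega, h3, h4, fun k hk1 hk2 => ?_⟩
    by_cases hki : k = i
    · subst hki; exact hx
    · exact h5 k hk1 (by omega)
  have hAlive_i : Alive A (i + 1) i ↔ (i + 1 < A.length ∧ mpRef A i < A.getD i 0) := by
    constructor
    · rintro ⟨-, -, h3, h4, -⟩; exact ⟨h3, h4⟩
    · rintro ⟨h3, h4⟩; exact ⟨hi1, by omega, h3, h4, fun k hk1 hk2 => by omega⟩
  rcases hcand with ⟨hnone, hno⟩ | ⟨j, hjA, hsome, hmin⟩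
  · -- cand was none: it is set iff i < n-1 and A[i] > runmax, i.e. iff i becomes alive
    by_cases hc : i < A.length - 1 ∧ mpRef A i < A.getD i 0
    · refine Or.inr ⟨i, hAlive_i.mpr ⟨by omega, hc.2⟩, ?_, ?_⟩
      · simp only [bStep, hnone, hrun]
        rw [if_pos ⟨trivial, hc.1, hc.2⟩]
      · intro j' hj'
        rcases hAlive_succ j' hj' with h | ⟨hj'i, -⟩
        · subst h; exact le_rfl
        · exact absurd hj'i (hno j')
    · refine Or.inl ⟨?_, ?_⟩
      · simp only [bStep, hnone, hrun]
        rw [if_neg (by rintro ⟨-, h2, h3⟩; exact hc ⟨by omega, h3⟩)]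
      · intro j' hj'
        rcases hAlive_succ j' hj' with h | ⟨hj'i, -⟩
        · subst h; rw [hAlive_i] at hj'; exact hc ⟨by omega, hj'.2⟩
        · exact hno j' hj'i
  · -- cand = some (A[j]), j minimal alive
    have hjle : A.getD j 0 ≤ mpRef A i := le_mpRef A i j hjA.2.1
    by_cases hx : A.getD i 0 ≤ A.getD j 0
    · -- candidate invalidated; nothing alive remains and nothing new can be set
      refine Or.inl ⟨?_, ?_⟩
      · simp only [bStep, hsome, hrun, if_pos hx]
        rw [if_neg (by rintro ⟨-, -, h3⟩; omega)]
      · intro j' hj'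
        rcases hAlive_succ j' hj' with h | ⟨hj'i, hlt⟩
        · subst h
          rw [hAlive_i] at hj'
          have := le_trans hx hjle
          omega
        · have := hmin j' hj'i
          omega
    · -- candidate survives; i may additionally be alive but with a larger value
      have hxlt : A.getD j 0 < A.getD i 0 := not_le.mp hx
      refine Or.inr ⟨j, hAlive_keep j hjA hxlt, ?_, ?_⟩
      · simp only [bStep, hsome, hrun, if_neg hx]
        rw [if_neg (by rintro ⟨h1, -⟩; exact Option.some_ne_none _ h1)]
      · intro j' hj'
        rcases hAlive_succ j' hj' with h | ⟨hj'i, -⟩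
        · subst h; rw [hrun] at *; rw [hAlive_i] at hj'; omega
        · exact hmin j' hj'i

theorem fold_inv (A : List Int) (hA : A ≠ []) :
    ∀ m : Nat, m ≤ A.length - 1 →
    LoopInv A (1 + m) ((List.range' 1 m).foldl (bStep A A.length) (none, A.getD 0 0)) := by
  have hn : 1 ≤ A.length := List.length_pos_of_ne_nil hA
  intro m
  induction m with
  | zero =>
    intro _
    refine ⟨?_, Or.inl ⟨rfl, ?_⟩⟩
    · show A.getD 0 0 = max (A.getD 0 0) (A.getD 0 0)
      rw [max_self]
    · rintro j ⟨h1, h2, -⟩; omega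
  | succ m ih =>
    intro hm
    rw [show List.range' 1 (m + 1) = List.range' 1 m ++ [1 + m] from by
      simpa using List.range'_concat (s := 1) (n := m) (step := 1), List.foldl_append]
    simp only [List.foldl_cons, List.foldl_nil]
    have := bStep_inv A _ (1 + m) (ih (by omega)) (by omega) (by omega)
    rwa [show 1 + m + 1 = 1 + (m + 1) from by omega] at this

-- ∃ alive at end of pass ↔ FoundPeak
theorem alive_end_iff (A : List Int) (hA : A ≠ []) :
    (∃ j, Alive A A.length j) ↔ FoundPeak A := by
  constructor
  · rintro ⟨j, h1, h2, h3, h4, h5⟩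
    refine ⟨j, h1, h3, h4, ?_⟩
    rw [show A.getD j 0 < msRef A (j + 1) ↔ _ from
      msRef_lt_iff A hA _ (A.length - 1 - (j + 1)) (j + 1) rfl h3]
    intro k hk1 hk2
    exact h5 k (by omega) hk2
  · rintro ⟨j, h1, h3, h4, h5⟩
    refine ⟨j, h1, by omega, h3, h4, fun k hk1 hk2 => ?_⟩
    rw [msRef_lt_iff A hA _ (A.length - 1 - (j + 1)) (j + 1) rfl h3] at h5
    exact h5 k (by omega) hk2

theorem perfectPeak_alt_one_iff (A : List Int) (hA : A ≠ []) :
    perfectPeak_alt A = 1 ↔ FoundPeak A := by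
  have hn : 1 ≤ A.length := List.length_pos_of_ne_nil hA
  have hinv := fold_inv A hA (A.length - 1) le_rfl
  rw [show 1 + (A.length - 1) = A.length from by omega] at hinv
  obtain ⟨-, hcand⟩ := hinv
  unfold perfectPeak_alt
  simp only []
  rcases hcand with ⟨hnone, hno⟩ | ⟨j, hjA, hsome, -⟩
  · rw [if_pos hnone]
    constructor
    · intro h; exact absurd h (by norm_num)
    · intro h
      obtain ⟨j', hj'⟩ := (alive_end_iff A hA).mpr h
      exact absurd hj' (hno j')
  · rw [if_neg (by rw [hsome]; exact Option.some_ne_none _)]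
    simp only [true_iff]
    exact (alive_end_iff A hA).mp ⟨j, hjA⟩

theorem perfectPeak_alt_zero_or_one (A : List Int) :
    perfectPeak_alt A = 0 ∨ perfectPeak_alt A = 1 := by
  unfold perfectPeak_alt
  simp only []
  split_ifs <;> simp

-- ===== VERDICT (by name: the statement is the Claim_ definition above) =====
theorem perfectPeak_spec : Claim_equal_perfectPeak := by
  intro A _ hPre
  unfold Spec_perfectPeak
  by_cases hf : FoundPeak A
  · rw [(perfectPeak_one_iff A hPre).mpr hf, (perfectPeak_alt_one_iff A hPre).mpr hf]
  · rcases perfectPeak_zero_or_one A with h1 | h1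
    · rcases perfectPeak_alt_zero_or_one A with h2 | h2
      · rw [h1, h2]
      · exact absurd ((perfectPeak_alt_one_iff A hPre).mp h2) hf
    · exact absurd ((perfectPeak_one_iff A hPre).mp h1) hf
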